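-- pv_equiv track=rewrite | github.com/ordoghunor/Szakdolgozat-NurseScheduling | NurseScheduling.py | kiszamol_szabad_per_nap
-- ===== SOURCE A (Python) =====
-- def kiszamol_szabad_per_nap(s):
--     szabadok_per_nap = []
--     for _ in s[0]:
--         szabadok_per_nap.append(0)
--     for i in s:
--         for j in range(i.__len__()):
--             if i[j] == 0:
--                 szabadok_per_nap[j] += 1
--     return szabadok_per_nap
-- ===== SOURCE B (Python) =====
-- def kiszamol_szabad_per_nap(s):
--     m = len(s[0])
--     return [sum(1 for row in s if j < len(row) and row[j] == 0) for j in range(m)]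
-- ===== Notes on version B (the rewrite author's own statement) =====
-- stated objective: simpler
-- what changed: Column-major one-liner: for each column index j, one counting pass over the rows, instead of A's row-major nested loops that append and then mutate an accumulator vector in place.
import Mathlib
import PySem

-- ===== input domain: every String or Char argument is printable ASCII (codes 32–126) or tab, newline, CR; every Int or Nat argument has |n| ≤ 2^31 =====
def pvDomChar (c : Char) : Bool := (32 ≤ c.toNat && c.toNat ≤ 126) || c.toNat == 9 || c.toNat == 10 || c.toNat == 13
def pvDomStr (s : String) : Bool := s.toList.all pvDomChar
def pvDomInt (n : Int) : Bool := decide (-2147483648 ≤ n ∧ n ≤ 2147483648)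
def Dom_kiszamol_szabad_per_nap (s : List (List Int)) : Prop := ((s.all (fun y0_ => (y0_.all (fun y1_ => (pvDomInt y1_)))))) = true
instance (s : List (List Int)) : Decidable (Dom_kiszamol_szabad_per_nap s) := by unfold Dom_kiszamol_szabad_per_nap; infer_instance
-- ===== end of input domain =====

-- B replaces A's row-major nested loops with mutable accumulator by a column-major
-- counting comprehension (one counter per column); objective: simpler, same cost.


-- ===== PORT A =====
-- 'szabadok_per_nap[j] += 1': Python raises when j ≥ len(acc); those inputs are
-- excluded by Pre_, where List.set is exact (it is a no-op out of range).
def kszpnStep (i : List Int) (acc : List Int) (j : Nat) : List Int :=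
  if i.getD j 1 = 0 then acc.set j (acc.getD j 0 + 1) else acc

def kiszamol_szabad_per_nap (s : List (List Int)) : List Int :=
  -- 's[0]' raises on empty s (excluded by Pre_); headD [] is exact inside Pre_
  let acc0 : List Int := (s.headD []).foldl (fun a _ => a ++ [0]) []
  s.foldl (fun acc i => (List.range i.length).foldl (fun a j => kszpnStep i a j) acc) acc0

-- ===== PORT B =====
def kiszamol_szabad_per_nap_alt (s : List (List Int)) : List Int :=
  let m := (s.headD []).length
  (List.range m).map (fun j =>
    s.foldl (fun c row => if j < row.length ∧ row.getD j 1 = 0 then c + 1 else c) (0 : Int))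

-- ===== PRECONDITION & SPEC =====
-- Pre_ excludes exactly the inputs on which A raises IndexError: the empty list
-- (s[0]) and inputs where some row holds a 0 at a column index ≥ len(s[0])
-- (the write szabadok_per_nap[j] += 1 then goes out of range).
def Pre_kiszamol_szabad_per_nap (s : List (List Int)) : Prop :=
  s ≠ [] ∧ ∀ r ∈ s, ∀ x ∈ r.drop (s.headD []).length, x ≠ (0 : Int)
instance (s : List (List Int)) : Decidable (Pre_kiszamol_szabad_per_nap s) := by
  unfold Pre_kiszamol_szabad_per_nap; infer_instance

def pvWitness_kiszamol_szabad_per_nap : List (List Int) := [[0, 1, 0], [2, 0, 3]]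

def Spec_kiszamol_szabad_per_nap (s : List (List Int)) (out : List Int) : Prop := out = kiszamol_szabad_per_nap_alt s
instance (s : List (List Int)) (out : List Int) : Decidable (Spec_kiszamol_szabad_per_nap s out) := by unfold Spec_kiszamol_szabad_per_nap; infer_instance

-- ===== CLAIM (what is proved, stated in full; the proofs are below) =====
def Claim_equal_kiszamol_szabad_per_nap : Prop := ∀ (s : List (List Int)), Dom_kiszamol_szabad_per_nap s → Pre_kiszamol_szabad_per_nap s → Spec_kiszamol_szabad_per_nap s (kiszamol_szabad_per_nap s)

-- ===== LEMMAS AND PROOFS =====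

-- the first loop of A builds a list of zeros
lemma kszpn_zeros (l : List Int) (b : List Int) :
    l.foldl (fun a _ => a ++ [(0 : Int)]) b = b ++ List.replicate l.length 0 := by
  induction l generalizing b with
  | nil => simp
  | cons x xs ih => simp [ih, List.replicate_succ]

lemma kszpn_step_length (i : List Int) (l : List Nat) (acc : List Int) :
    (l.foldl (fun a j => kszpnStep i a j) acc).length = acc.length := by
  induction l generalizing acc with
  | nil => rfl
  | cons j js ih =>
    rw [List.foldl_cons, ih]
    unfold kszpnStep; split_ifs <;> simp

lemma kszpn_getD_set_self (l : List Int) (n : Nat) (v : Int) (h : n < l.length) :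
    (l.set n v).getD n 0 = v := by
  simp [List.getD_eq_getElem?_getD, h]

lemma kszpn_getD_set_ne (l : List Int) (n k : Nat) (v : Int) (h : n ≠ k) :
    (l.set n v).getD k 0 = l.getD k 0 := by
  simp [List.getD_eq_getElem?_getD, List.getElem?_set_ne h]

-- characterisation of A's inner loop (one row)
lemma kszpn_inner (i : List Int) (n : Nat) (acc : List Int)
    (h : ∀ j < n, i.getD j 1 = 0 → j < acc.length) (k : Nat) :
    ((List.range n).foldl (fun a j => kszpnStep i a j) acc).getD k 0
      = if k < n ∧ i.getD k 1 = 0 then acc.getD k 0 + 1 else acc.getD k 0 := by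
  induction n with
  | zero => simp
  | succ n ih =>
    have h' : ∀ j < n, i.getD j 1 = 0 → j < acc.length := fun j hj => h j (by omega)
    rw [List.range_succ, List.foldl_append, List.foldl_cons, List.foldl_nil]
    set P := (List.range n).foldl (fun a j => kszpnStep i a j) acc with hP
    have hlen : P.length = acc.length := kszpn_step_length i (List.range n) acc
    show (kszpnStep i P n).getD k 0 = _
    unfold kszpnStep
    by_cases hz : i.getD n 1 = 0
    · have hn : n < acc.length := h n (by omega) hz
      rw [if_pos hz]
      by_cases hk : k = n
      · subst hk
        have hPk : P.getD k 0 = acc.getD k 0 := by rw [ih h']; simp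
        rw [kszpn_getD_set_self P k _ (by omega), hPk]
        have hlt : k < k + 1 := by omega
        rw [if_pos ⟨hlt, hz⟩]
      · rw [kszpn_getD_set_ne P n k _ (fun he => hk he.symm), ih h']
        by_cases hkn : k < n
        · have : k < n + 1 := by omega
          simp [hkn, this]
        · have : ¬ k < n + 1 := by omega
          simp [hkn, this]
    · rw [if_neg hz, ih h']
      by_cases hk : k = n
      · subst hk
        have h1 : ¬ (k < k ∧ i.getD k 1 = 0) := fun ⟨hc, _⟩ => absurd hc (by omega)
        have h2 : ¬ (k < k + 1 ∧ i.getD k 1 = 0) := fun ⟨_, hc⟩ => hz hc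
        rw [if_neg h1, if_neg h2]
      · by_cases hkn : k < n
        · have : k < n + 1 := by omega
          simp [hkn, this]
        · have : ¬ k < n + 1 := by omega
          simp [hkn, this]

lemma kszpn_outer_length (rows : List (List Int)) (acc : List Int) :
    (rows.foldl (fun acc i => (List.range i.length).foldl (fun a j => kszpnStep i a j) acc) acc).length
      = acc.length := by
  induction rows generalizing acc with
  | nil => rfl
  | cons r rs ih => simp only [List.foldl_cons, ih, kszpn_step_length]

-- A's nested fold, read at one column k, is B's single counting pass over the rows
lemma kszpn_outer (rows : List (List Int)) (acc : List Int)
    (h : ∀ r ∈ rows, ∀ j, j < r.length → r.getD j 1 = 0 → j < acc.length) (k : Nat) :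
    (rows.foldl (fun acc i => (List.range i.length).foldl (fun a j => kszpnStep i a j) acc) acc).getD k 0
      = rows.foldl (fun c row => if k < row.length ∧ row.getD k 1 = 0 then c + 1 else c) (acc.getD k 0) := by
  induction rows generalizing acc with
  | nil => rfl
  | cons r rs ih =>
    simp only [List.foldl_cons]
    have hr : ∀ j < r.length, r.getD j 1 = 0 → j < acc.length :=
      fun j hj hz => h r (by simp) j hj hz
    have hlen := kszpn_step_length r (List.range r.length) acc
    rw [ih _ (fun r' hr' j hj hz => by rw [hlen]; exact h r' (by simp [hr']) j hj hz)]
    rw [kszpn_inner r r.length acc hr k]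

lemma kszpn_pre_bound (s : List (List Int)) (hpre : Pre_kiszamol_szabad_per_nap s) :
    ∀ r ∈ s, ∀ j, j < r.length → r.getD j 1 = 0 → j < (s.headD []).length := by
  intro r hr j hj hz
  by_contra hge
  set m := (s.headD []).length with hm
  have hjm : m ≤ j := by omega
  have hdl : j - m < (r.drop m).length := by
    rw [List.length_drop]; omega
  have hmem : r.getD j 1 ∈ r.drop m := by
    rw [List.getD_eq_getElem r 1 hj]
    have : r[j]'hj = (r.drop m)[j - m]'hdl := by
      rw [List.getElem_drop]
      congr 1; omega
    rw [this]
    exact List.getElem_mem _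
  exact hpre.2 r hr _ hmem hz

-- ===== VERDICT (by name: the statement is the Claim_ definition above) =====
theorem kiszamol_szabad_per_nap_spec : Claim_equal_kiszamol_szabad_per_nap := by
  intro s _ hpre
  unfold Spec_kiszamol_szabad_per_nap kiszamol_szabad_per_nap kiszamol_szabad_per_nap_alt
  simp only
  rw [kszpn_zeros]
  simp only [List.nil_append]
  set m := (s.headD []).length with hm
  apply List.ext_getElem
  · rw [kszpn_outer_length]; simp [hm]
  · intro k hk1 hk2
    have hkm : k < m := by simpa using hk2
    have hlen : (s.foldl (fun acc i => (List.range i.length).foldl (fun a j => kszpnStep i a j) acc) (List.replicate m 0)).length = m := by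
      rw [kszpn_outer_length]; simp
    rw [← List.getD_eq_getElem _ 0 hk1]
    rw [kszpn_outer s (List.replicate m 0)
      (by intro r hr j hj hz; rw [List.length_replicate]; exact kszpn_pre_bound s hpre r hr j hj hz) k]
    simp [hkm]
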